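-- pv_equiv track=rewrite | github.com/HenriqueBBrum/Network-Wide-Rule-Orchestrator | utils/offload_table_entries.py | firstfit_order_subsets
-- ===== SOURCE A (Python) =====
-- def firstfit_order_subsets(switch, subsets_to_offload):
--     composite_subsets, single_switch_subsets = [], []
--     second_composite_subsets = []
--     ordered_subsets = []
--     for subset_id in subsets_to_offload:
--         if subset_id == "generic":
--             ordered_subsets.insert(0,subset_id)
--         elif "+" in subset_id and switch in subset_id:
--             composite_subsets.append(subset_id)
--         elif "+" in subset_id and switch not in subset_id:
--             second_composite_subsets.append(subset_id)
--         elif subset_id != switch and "+" not in subset_id: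
--             single_switch_subsets.append(subset_id)
--
--     ordered_subsets.append(switch)
--     ordered_subsets.extend(sorted(composite_subsets))
--     ordered_subsets.extend(sorted(second_composite_subsets))
--     ordered_subsets.extend(sorted(single_switch_subsets))
--     return ordered_subsets
-- ===== SOURCE B (Python) =====
-- def firstfit_order_subsets(switch, subsets_to_offload):
--     # Single pass: count generics and keep one ordered list by direct ordered
--     # insertion (insertion sort), instead of three buckets each library-sorted.
--     def key(s):
--         return ((0 if switch in s else 1) if "+" in s else 2, s)
--
--     n_generic, ordered = 0, []
--     for s in subsets_to_offload:
--         if s == "generic":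
--             n_generic += 1
--         elif s != switch or "+" in s:
--             i = 0
--             while i < len(ordered) and key(ordered[i]) <= key(s):
--                 i += 1
--             ordered.insert(i, s)
--     return ["generic"] * n_generic + [switch] + ordered
-- ===== Notes on version B (the rewrite author's own statement) =====
-- stated objective: alternative
-- what changed: A buckets ids into three lists in one loop and then library-sorts each bucket; B makes a single pass that counts generics and places every kept id directly at its final position by ordered insertion (insertion sort under the (rank, id) key), with no buckets and no library sort.
import Mathlib
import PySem

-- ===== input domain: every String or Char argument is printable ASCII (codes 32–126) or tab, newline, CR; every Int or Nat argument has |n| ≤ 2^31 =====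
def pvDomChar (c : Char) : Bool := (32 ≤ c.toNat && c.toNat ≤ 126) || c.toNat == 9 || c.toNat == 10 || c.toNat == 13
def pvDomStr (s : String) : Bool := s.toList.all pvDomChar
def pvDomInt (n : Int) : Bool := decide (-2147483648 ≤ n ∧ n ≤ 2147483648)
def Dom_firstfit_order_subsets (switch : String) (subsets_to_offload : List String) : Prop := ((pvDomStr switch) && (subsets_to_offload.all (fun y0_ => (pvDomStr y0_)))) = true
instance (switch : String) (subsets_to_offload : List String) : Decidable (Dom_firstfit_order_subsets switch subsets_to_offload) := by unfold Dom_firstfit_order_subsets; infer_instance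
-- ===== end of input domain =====

-- B replaces A's three bucket lists plus three library sorts by one pass that counts
-- generics and places each kept id at its final position by ordered insertion; objective:
-- alternative algorithm, not faster.

-- ===== PORT A =====
def firstfit_order_subsets (switch : String) (subsets_to_offload : List String) : List String :=
  -- state = (composite_subsets, second_composite_subsets, single_switch_subsets, ordered_subsets)
  let st := subsets_to_offload.foldl
    (fun (st : List String × List String × List String × List String) subset_id =>
      if subset_id == "generic" then
        (st.1, st.2.1, st.2.2.1, PySem.List.insert st.2.2.2 0 subset_id)
      else if PySem.Str.isIn "+" subset_id && PySem.Str.isIn switch subset_id then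
        (st.1 ++ [subset_id], st.2.1, st.2.2.1, st.2.2.2)
      else if PySem.Str.isIn "+" subset_id && !PySem.Str.isIn switch subset_id then
        (st.1, st.2.1 ++ [subset_id], st.2.2.1, st.2.2.2)
      else if subset_id != switch && !PySem.Str.isIn "+" subset_id then
        (st.1, st.2.1, st.2.2.1 ++ [subset_id], st.2.2.2)
      else st)
    ([], [], [], [])
  ((st.2.2.2 ++ [switch]) ++ PySem.List.sorted st.1 (fun x => x))
    ++ PySem.List.sorted st.2.1 (fun x => x) ++ PySem.List.sorted st.2.2.1 (fun x => x)

-- ===== PORT B =====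
def pvRankB (switch s : String) : Int :=
  if PySem.Str.isIn "+" s then (if PySem.Str.isIn switch s then 0 else 1) else 2

-- key(s) in Source B: the tuple ((0|1|2), s) compared lexicographically (Python tuple <=)
def pvKeyB (switch s : String) : Int ×ₗ String := toLex (pvRankB switch s, s)

-- Source B's while-loop + list.insert: walk past the elements whose key is <= key(s), put s there
def pvInsB (switch s : String) : List String → List String
  | [] => [s]
  | x :: xs => if pvKeyB switch x ≤ pvKeyB switch s then x :: pvInsB switch s xs else s :: x :: xs

def firstfit_order_subsets_alt (switch : String) (subsets_to_offload : List String) : List String :=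
  -- state = (n_generic, ordered)
  let st := subsets_to_offload.foldl
    (fun (st : Nat × List String) s =>
      if s == "generic" then (st.1 + 1, st.2)
      else if s != switch || PySem.Str.isIn "+" s then (st.1, pvInsB switch s st.2)
      else st)
    (0, [])
  List.replicate st.1 "generic" ++ [switch] ++ st.2

-- ===== PRECONDITION & SPEC =====
def Spec_firstfit_order_subsets (switch : String) (subsets_to_offload : List String) (out : List String) : Prop := out = firstfit_order_subsets_alt switch subsets_to_offload
instance (switch : String) (subsets_to_offload : List String) (out : List String) : Decidable (Spec_firstfit_order_subsets switch subsets_to_offload out) := by unfold Spec_firstfit_order_subsets; infer_instance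

-- ===== CLAIM (what is proved, stated in full; the proofs are below) =====
def Claim_equal_firstfit_order_subsets : Prop := ∀ (switch : String) (subsets_to_offload : List String), Dom_firstfit_order_subsets switch subsets_to_offload → Spec_firstfit_order_subsets switch subsets_to_offload (firstfit_order_subsets switch subsets_to_offload)

-- ===== LEMMAS AND PROOFS =====

-- branch predicates of A's loop
def pvG (s : String) : Bool := s == "generic"
def pvPC (switch s : String) : Bool := !pvG s && (PySem.Str.isIn "+" s && PySem.Str.isIn switch s)
def pvP2 (switch s : String) : Bool := !pvG s && (PySem.Str.isIn "+" s && !PySem.Str.isIn switch s)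
def pvPS (switch s : String) : Bool := !pvG s && (!PySem.Str.isIn "+" s && s != switch)
-- B's kept predicate
def pvKB (switch s : String) : Bool := s != "generic" && !(s == switch && !PySem.Str.isIn "+" s)

theorem foldA_char (switch : String) (l : List String) (c s2 s1 o : List String) :
    l.foldl
      (fun (st : List String × List String × List String × List String) subset_id =>
        if subset_id == "generic" then
          (st.1, st.2.1, st.2.2.1, PySem.List.insert st.2.2.2 0 subset_id)
        else if PySem.Str.isIn "+" subset_id && PySem.Str.isIn switch subset_id then
          (st.1 ++ [subset_id], st.2.1, st.2.2.1, st.2.2.2)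
        else if PySem.Str.isIn "+" subset_id && !PySem.Str.isIn switch subset_id then
          (st.1, st.2.1 ++ [subset_id], st.2.2.1, st.2.2.2)
        else if subset_id != switch && !PySem.Str.isIn "+" subset_id then
          (st.1, st.2.1, st.2.2.1 ++ [subset_id], st.2.2.2)
        else st)
      (c, s2, s1, o)
    = (c ++ l.filter (pvPC switch), s2 ++ l.filter (pvP2 switch),
       s1 ++ l.filter (pvPS switch), (l.filter pvG).reverse ++ o) := by
  induction l generalizing c s2 s1 o with
  | nil => simp
  | cons x t ih =>
    simp only [List.foldl_cons]
    simp [PySem.List.insert_zero] at ih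
    by_cases h2 : x = switch
    · subst h2
      by_cases h1 : x = "generic"
      · subst h1
        simp at ih
        simp [pvG, pvPC, pvP2, pvPS, PySem.List.insert_zero]
        exact ih c s2 s1 ("generic" :: o)
      · cases h3 : PySem.Chars.isIn ['+'] x.toList <;>
          cases h4 : PySem.Chars.isIn x.toList x.toList <;>
          simp [pvG, pvPC, pvP2, pvPS, h1, h3, h4, ih, PySem.List.insert_zero]
    · by_cases h1 : x = "generic"
      · subst h1
        simp [pvG, pvPC, pvP2, pvPS, PySem.List.insert_zero]
        exact ih c s2 s1 ("generic" :: o)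
      · cases h3 : PySem.Chars.isIn ['+'] x.toList <;>
          cases h4 : PySem.Chars.isIn switch.toList x.toList <;>
          simp [pvG, pvPC, pvP2, pvPS, h1, h2, h3, h4, ih, PySem.List.insert_zero]

theorem rank_of_pc (switch s : String) (h : pvPC switch s = true) : pvRankB switch s = 0 := by
  simp [pvPC] at h; simp [pvRankB, h.2.1, h.2.2]

theorem rank_of_p2 (switch s : String) (h : pvP2 switch s = true) : pvRankB switch s = 1 := by
  simp [pvP2] at h; simp [pvRankB, h.2.1, h.2.2]

theorem rank_of_ps (switch s : String) (h : pvPS switch s = true) : pvRankB switch s = 2 := by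
  simp [pvPS] at h; simp [pvRankB, h.2.1]

-- pairwise of one sorted bucket whose elements all have the same rank r
theorem bucket_pairwise (switch : String) (p : String → Bool) (r : Int) (xs : List String)
    (hr : ∀ s, p s = true → pvRankB switch s = r) :
    (PySem.List.sorted (xs.filter p) (fun x => x)).Pairwise
      (fun a b => pvKeyB switch a ≤ pvKeyB switch b) := by
  refine (PySem.List.sorted_pairwise (xs.filter p) (fun x => x)).imp_of_mem ?_
  intro a b ha hb hab
  rw [PySem.List.mem_sorted] at ha hb
  have hra := hr a (List.of_mem_filter ha)
  have hrb := hr b (List.of_mem_filter hb)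
  rw [pvKeyB, pvKeyB, Prod.Lex.toLex_le_toLex]
  exact Or.inr ⟨by rw [hra, hrb], hab⟩

theorem rank_le_of_mem_sorted (switch : String) (p q : String → Bool) (rp rq : Int)
    (xs ys : List String) (hlt : rp < rq)
    (hp : ∀ s, p s = true → pvRankB switch s = rp) (hq : ∀ s, q s = true → pvRankB switch s = rq) :
    ∀ a ∈ PySem.List.sorted (xs.filter p) (fun x => x),
      ∀ b ∈ PySem.List.sorted (ys.filter q) (fun x => x),
        pvKeyB switch a ≤ pvKeyB switch b := by
  intro a ha b hb
  rw [PySem.List.mem_sorted] at ha hb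
  have hra := hp a (List.of_mem_filter ha)
  have hrb := hq b (List.of_mem_filter hb)
  refine le_of_lt ?_
  rw [pvKeyB, pvKeyB, Prod.Lex.toLex_lt_toLex]
  exact Or.inl (by rw [hra, hrb]; exact hlt)

theorem filter_perm_split {α : Type} (p q : α → Bool) (l : List α) :
    (l.filter p).Perm (l.filter (fun x => p x && q x) ++ l.filter (fun x => p x && !q x)) := by
  induction l with
  | nil => simp
  | cons x t ih =>
    cases hp : p x
    · simpa [hp] using ih
    · cases hq : q x
      · simpa [hp, hq] using (ih.cons x).trans List.perm_middle.symm
      · simpa [hp, hq] using ih.cons x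

theorem kept_perm (switch : String) (l : List String) :
    (l.filter (pvKB switch)).Perm
      (l.filter (pvPC switch) ++ l.filter (pvP2 switch) ++ l.filter (pvPS switch)) := by
  have h1 := filter_perm_split (pvKB switch) (fun s => PySem.Str.isIn "+" s) l
  have e2 : l.filter (fun x => pvKB switch x && PySem.Str.isIn "+" x)
      = l.filter (fun x => pvPC switch x || pvP2 switch x) := by
    refine List.filter_congr ?_
    intro x _
    simp only [pvKB, pvPC, pvP2, pvG, bne]
    cases (x == "generic") <;> cases (x == switch) <;>
      cases PySem.Str.isIn "+" x <;> cases PySem.Str.isIn switch x <;> rfl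
  have e3 : l.filter (fun x => pvKB switch x && !PySem.Str.isIn "+" x) = l.filter (pvPS switch) := by
    refine List.filter_congr ?_
    intro x _
    simp only [pvKB, pvPS, pvG, bne]
    cases (x == "generic") <;> cases (x == switch) <;> cases PySem.Str.isIn "+" x <;> rfl
  have h2 := filter_perm_split (fun s => pvPC switch s || pvP2 switch s)
      (fun s => PySem.Str.isIn switch s) l
  have e4 : l.filter (fun x => (pvPC switch x || pvP2 switch x) && PySem.Str.isIn switch x)
      = l.filter (pvPC switch) := by
    refine List.filter_congr ?_
    intro x _
    simp only [pvPC, pvP2, pvG]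
    cases (x == "generic") <;> cases PySem.Str.isIn "+" x <;>
      cases PySem.Str.isIn switch x <;> rfl
  have e5 : l.filter (fun x => (pvPC switch x || pvP2 switch x) && !PySem.Str.isIn switch x)
      = l.filter (pvP2 switch) := by
    refine List.filter_congr ?_
    intro x _
    simp only [pvPC, pvP2, pvG]
    cases (x == "generic") <;> cases PySem.Str.isIn "+" x <;>
      cases PySem.Str.isIn switch x <;> rfl
  rw [e2, e3] at h1
  rw [e4, e5] at h2
  exact h1.trans (List.Perm.append_right _ h2)

theorem key_injective (switch : String) :
    Function.Injective (pvKeyB switch) := by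
  intro a b h
  have := congrArg (fun p : Int ×ₗ String => (ofLex p).2) h
  simpa [pvKeyB] using this

-- A's three sorted buckets, concatenated, form one key-sorted list
theorem tails_pairwise (switch : String) (l : List String) :
    (PySem.List.sorted (l.filter (pvPC switch)) (fun x => x)
      ++ PySem.List.sorted (l.filter (pvP2 switch)) (fun x => x)
      ++ PySem.List.sorted (l.filter (pvPS switch)) (fun x => x)).Pairwise
      (fun a b => pvKeyB switch a ≤ pvKeyB switch b) := by
  rw [List.pairwise_append, List.pairwise_append]
  refine ⟨⟨bucket_pairwise switch _ 0 l (rank_of_pc switch),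
          bucket_pairwise switch _ 1 l (rank_of_p2 switch),
          rank_le_of_mem_sorted switch _ _ 0 1 l l (by norm_num) (rank_of_pc switch) (rank_of_p2 switch)⟩,
        bucket_pairwise switch _ 2 l (rank_of_ps switch), ?_⟩
  intro a ha b hb
  rcases List.mem_append.mp ha with ha' | ha'
  · exact rank_le_of_mem_sorted switch _ _ 0 2 l l (by norm_num) (rank_of_pc switch) (rank_of_ps switch) a ha' b hb
  · exact rank_le_of_mem_sorted switch _ _ 1 2 l l (by norm_num) (rank_of_p2 switch) (rank_of_ps switch) a ha' b hb

-- B's insertion step: permutation and sortedness preservation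
theorem insB_perm (switch s : String) (l : List String) :
    (pvInsB switch s l).Perm (s :: l) := by
  induction l with
  | nil => simp [pvInsB]
  | cons x xs ih =>
    rw [pvInsB]
    split_ifs with h
    · exact (ih.cons x).trans (List.Perm.swap s x xs)
    · exact List.Perm.refl _

theorem insB_pairwise (switch s : String) (l : List String)
    (h : l.Pairwise (fun a b => pvKeyB switch a ≤ pvKeyB switch b)) :
    (pvInsB switch s l).Pairwise (fun a b => pvKeyB switch a ≤ pvKeyB switch b) := by
  induction l with
  | nil => simp [pvInsB]
  | cons x xs ih =>
    rw [List.pairwise_cons] at h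
    rw [pvInsB]
    split_ifs with hc
    · refine List.pairwise_cons.mpr ⟨?_, ih h.2⟩
      intro y hy
      rcases List.mem_cons.mp ((insB_perm switch s xs).mem_iff.mp hy) with rfl | hy'
      · exact hc
      · exact h.1 y hy'
    · have hc' : pvKeyB switch s < pvKeyB switch x := lt_of_not_ge hc
      refine List.pairwise_cons.mpr ⟨?_, List.pairwise_cons.mpr h⟩
      intro y hy
      rcases List.mem_cons.mp hy with rfl | hy'
      · exact le_of_lt hc'
      · exact le_trans (le_of_lt hc') (h.1 y hy')

theorem foldl_insB_perm (switch : String) (l acc : List String) :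
    (l.foldl (fun acc s => pvInsB switch s acc) acc).Perm (l ++ acc) := by
  induction l generalizing acc with
  | nil => simp
  | cons x t ih =>
    refine (ih (pvInsB switch x acc)).trans ?_
    exact (List.Perm.append_left t (insB_perm switch x acc)).trans List.perm_middle

theorem foldl_insB_pairwise (switch : String) (l acc : List String)
    (h : acc.Pairwise (fun a b => pvKeyB switch a ≤ pvKeyB switch b)) :
    (l.foldl (fun acc s => pvInsB switch s acc) acc).Pairwise
      (fun a b => pvKeyB switch a ≤ pvKeyB switch b) := by
  induction l generalizing acc with
  | nil => exact h
  | cons x t ih => exact ih _ (insB_pairwise switch x acc h)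

-- characterization of B's fold
theorem foldB_char (switch : String) (l : List String) (n : Nat) (acc : List String) :
    l.foldl
      (fun (st : Nat × List String) s =>
        if s == "generic" then (st.1 + 1, st.2)
        else if s != switch || PySem.Str.isIn "+" s then (st.1, pvInsB switch s st.2)
        else st)
      (n, acc)
    = (n + (l.filter pvG).length,
       (l.filter (pvKB switch)).foldl (fun acc s => pvInsB switch s acc) acc) := by
  induction l generalizing n acc with
  | nil => simp
  | cons x t ih =>
    simp only [List.foldl_cons]
    cases hx : (x == "generic") with
    | true =>
      have h1 : x = "generic" := by simpa using hx
      rw [if_pos rfl, ih]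
      have hkx : pvKB switch x = false := by simp [pvKB, h1]
      rw [List.filter_cons, List.filter_cons]
      simp only [hx, hkx, pvG]
      simp [h1]
      omega
    | false =>
      have h1 : ¬ (x = "generic") := by simpa using hx
      have hg : pvG x = false := hx
      have hk : pvKB switch x = (x != switch || PySem.Str.isIn "+" x) := by
        simp only [pvKB, bne]
        cases hy : (x == switch) <;> simp [h1]
      simp only [Bool.false_eq_true, if_false]
      cases hc : (x != switch || PySem.Str.isIn "+" x) with
      | true =>
        rw [if_pos rfl, ih]
        have hc' : (¬x = switch ∨ PySem.Chars.isIn ['+'] x.toList = true) := by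
          simpa [PySem.Str.isIn, bne] using hc
        rw [List.filter_cons, List.filter_cons]
        simp [pvG, hx, hk, hc']
      | false =>
        simp only [Bool.false_eq_true, if_false]
        rw [ih]
        have hc' : ¬ (¬x = switch ∨ PySem.Chars.isIn ['+'] x.toList = true) := by
          simpa [PySem.Str.isIn, bne] using hc
        rw [List.filter_cons, List.filter_cons]
        simp [pvG, hx, hk, hc']

-- B's insertion-sorted kept list equals A's concatenation of sorted buckets
theorem insSort_eq_tails (switch : String) (l : List String) :
    (l.filter (pvKB switch)).foldl (fun acc s => pvInsB switch s acc) []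
    = PySem.List.sorted (l.filter (pvPC switch)) (fun x => x)
      ++ PySem.List.sorted (l.filter (pvP2 switch)) (fun x => x)
      ++ PySem.List.sorted (l.filter (pvPS switch)) (fun x => x) := by
  refine PySem.List.eq_of_perm_of_pairwise_le_of_injective
    (pvKeyB switch) (key_injective switch) ?_ ?_ ?_
  · refine (foldl_insB_perm switch _ []).trans ?_
    rw [List.append_nil]
    refine (kept_perm switch l).trans ?_
    exact (((PySem.List.sorted_perm (l.filter (pvPC switch)) (fun x => x) false).append
        (PySem.List.sorted_perm (l.filter (pvP2 switch)) (fun x => x) false)).append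
        (PySem.List.sorted_perm (l.filter (pvPS switch)) (fun x => x) false)).symm
  · exact foldl_insB_pairwise switch _ [] (by simp)
  · exact tails_pairwise switch l

theorem generics_replicate (l : List String) :
    (l.filter pvG).reverse = List.replicate (l.filter pvG).length "generic" := by
  have h : l.filter pvG = List.replicate (l.filter pvG).length "generic" := by
    refine List.eq_replicate_of_mem ?_
    intro b hb
    have := List.of_mem_filter hb
    simpa [pvG] using this
  rw [h, List.reverse_replicate]
  simp

-- ===== VERDICT (by name: the statement is the Claim_ definition above) =====
theorem firstfit_order_subsets_spec : Claim_equal_firstfit_order_subsets := by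
  intro switch l _
  unfold Spec_firstfit_order_subsets firstfit_order_subsets firstfit_order_subsets_alt
  rw [foldA_char, foldB_char]
  simp only [List.nil_append, List.append_nil]
  rw [insSort_eq_tails switch l, generics_replicate]
  simp [List.append_assoc]
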